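-- pv_equiv track=rewrite | github.com/A1anMc/MOVEMBER | rules/domains/movember_ai/behaviours.py | convert_to_uk_spelling
-- ===== SOURCE A (Python) =====
-- def convert_to_uk_spelling(text: str) -> str:
--     """
--     Convert American spelling to UK spelling.
--
--     Args:
--         text: Text to convert
--
--     Returns:
--         Text with UK spelling
--     """
--     uk_conversions = {
--         'color': 'colour',
--         'behavior': 'behaviour',
--         'organization': 'organisation',
--         'realize': 'realise',
--         'analyze': 'analyse',
--         'center': 'centre',
--         'meter': 'metre',
--         'program': 'programme',
--         'license': 'licence',
--         'defense': 'defence',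
--         'offense': 'offence',
--         'specialize': 'specialise',
--         'standardize': 'standardise',
--         'optimize': 'optimise',
--         'customize': 'customise',
--         'summarize': 'summarise',
--         'categorize': 'categorise',
--         'prioritize': 'prioritise'
--     }
--
--     converted_text = text
--     for us_spelling, uk_spelling in uk_conversions.items():
--         converted_text = converted_text.replace(us_spelling, uk_spelling)
--
--     return converted_text
-- ===== SOURCE B (Python) =====
-- def convert_to_uk_spelling(text: str) -> str:
--     """
--     Convert American spelling to UK spelling.
--
--     Single left-to-right pass: at each position, emit the UK replacement of
--     the first US spelling that starts there, else copy the character.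
--     """
--     conversions = (
--         ('color', 'colour'), ('behavior', 'behaviour'),
--         ('organization', 'organisation'), ('realize', 'realise'),
--         ('analyze', 'analyse'), ('center', 'centre'),
--         ('meter', 'metre'), ('program', 'programme'),
--         ('license', 'licence'), ('defense', 'defence'),
--         ('offense', 'offence'), ('specialize', 'specialise'),
--         ('standardize', 'standardise'), ('optimize', 'optimise'),
--         ('customize', 'customise'), ('summarize', 'summarise'),
--         ('categorize', 'categorise'), ('prioritize', 'prioritise'),
--     )
--
--     out = []
--     i = 0
--     n = len(text)
--     while i < n:
--         for us_spelling, uk_spelling in conversions: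
--             if text.startswith(us_spelling, i):
--                 out.append(uk_spelling)
--                 i += len(us_spelling)
--                 break
--         else:
--             out.append(text[i])
--             i += 1
--     return ''.join(out)
-- ===== Notes on version B (the rewrite author's own statement) =====
-- stated objective: alternative
-- what changed: Replaces A's 18 sequential whole-string replace passes by a single left-to-right scan that at each position emits the first matching US spelling's UK form (or copies the character), so the text is traversed once and no replacement output is ever re-examined.
-- outside the precondition, e.g. on convert_to_uk_spelling('colorealize'): A returns 'colourealise', B returns 'colourealize'; on convert_to_uk_spelling('programeter'): A returns 'programmeetre', B returns 'programmeeter'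
import Mathlib
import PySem

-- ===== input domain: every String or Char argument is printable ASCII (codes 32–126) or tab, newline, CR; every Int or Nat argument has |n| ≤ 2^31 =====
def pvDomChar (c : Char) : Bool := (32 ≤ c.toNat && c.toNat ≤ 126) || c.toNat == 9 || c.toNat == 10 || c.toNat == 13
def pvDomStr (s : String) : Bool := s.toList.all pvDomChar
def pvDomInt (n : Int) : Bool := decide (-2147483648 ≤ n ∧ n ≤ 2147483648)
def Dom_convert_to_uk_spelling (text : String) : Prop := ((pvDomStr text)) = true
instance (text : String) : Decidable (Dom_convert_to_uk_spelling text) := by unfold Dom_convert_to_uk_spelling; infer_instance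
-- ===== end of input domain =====

-- B replaces A's 18 sequential whole-string replace passes by one left-to-right scan
-- that at each position emits the first matching US spelling's UK form (objective: alternative).

-- ===== PORT A =====
def convert_to_uk_spelling (text : String) : String :=
  let uk_conversions : List (String × String) :=
    [("color", "colour"), ("behavior", "behaviour"), ("organization", "organisation"),
     ("realize", "realise"), ("analyze", "analyse"), ("center", "centre"),
     ("meter", "metre"), ("program", "programme"), ("license", "licence"),
     ("defense", "defence"), ("offense", "offence"), ("specialize", "specialise"),
     ("standardize", "standardise"), ("optimize", "optimise"), ("customize", "customise"),
     ("summarize", "summarise"), ("categorize", "categorise"), ("prioritize", "prioritise")]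
  uk_conversions.foldl (fun converted_text p => PySem.Str.replace converted_text p.1 p.2) text

-- ===== PORT B =====
-- the same conversion table, as char lists (Source B's dict items, in order)
def pvUkRules : List (List Char × List Char) :=
  [(['c', 'o', 'l', 'o', 'r'], ['c', 'o', 'l', 'o', 'u', 'r']),
   (['b', 'e', 'h', 'a', 'v', 'i', 'o', 'r'], ['b', 'e', 'h', 'a', 'v', 'i', 'o', 'u', 'r']),
   (['o', 'r', 'g', 'a', 'n', 'i', 'z', 'a', 't', 'i', 'o', 'n'], ['o', 'r', 'g', 'a', 'n', 'i', 's', 'a', 't', 'i', 'o', 'n']),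
   (['r', 'e', 'a', 'l', 'i', 'z', 'e'], ['r', 'e', 'a', 'l', 'i', 's', 'e']),
   (['a', 'n', 'a', 'l', 'y', 'z', 'e'], ['a', 'n', 'a', 'l', 'y', 's', 'e']),
   (['c', 'e', 'n', 't', 'e', 'r'], ['c', 'e', 'n', 't', 'r', 'e']),
   (['m', 'e', 't', 'e', 'r'], ['m', 'e', 't', 'r', 'e']),
   (['p', 'r', 'o', 'g', 'r', 'a', 'm'], ['p', 'r', 'o', 'g', 'r', 'a', 'm', 'm', 'e']),
   (['l', 'i', 'c', 'e', 'n', 's', 'e'], ['l', 'i', 'c', 'e', 'n', 'c', 'e']),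
   (['d', 'e', 'f', 'e', 'n', 's', 'e'], ['d', 'e', 'f', 'e', 'n', 'c', 'e']),
   (['o', 'f', 'f', 'e', 'n', 's', 'e'], ['o', 'f', 'f', 'e', 'n', 'c', 'e']),
   (['s', 'p', 'e', 'c', 'i', 'a', 'l', 'i', 'z', 'e'], ['s', 'p', 'e', 'c', 'i', 'a', 'l', 'i', 's', 'e']),
   (['s', 't', 'a', 'n', 'd', 'a', 'r', 'd', 'i', 'z', 'e'], ['s', 't', 'a', 'n', 'd', 'a', 'r', 'd', 'i', 's', 'e']),
   (['o', 'p', 't', 'i', 'm', 'i', 'z', 'e'], ['o', 'p', 't', 'i', 'm', 'i', 's', 'e']),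
   (['c', 'u', 's', 't', 'o', 'm', 'i', 'z', 'e'], ['c', 'u', 's', 't', 'o', 'm', 'i', 's', 'e']),
   (['s', 'u', 'm', 'm', 'a', 'r', 'i', 'z', 'e'], ['s', 'u', 'm', 'm', 'a', 'r', 'i', 's', 'e']),
   (['c', 'a', 't', 'e', 'g', 'o', 'r', 'i', 'z', 'e'], ['c', 'a', 't', 'e', 'g', 'o', 'r', 'i', 's', 'e']),
   (['p', 'r', 'i', 'o', 'r', 'i', 't', 'i', 'z', 'e'], ['p', 'r', 'i', 'o', 'r', 'i', 't', 'i', 's', 'e'])]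

-- Source B's inner `for ... if text.startswith(us, i): ... break / else:` — first rule matching at the position
def pvFindRule (l : List Char) : List (List Char × List Char) → Option (List Char × List Char)
  | [] => none
  | r :: rest => if r.1.isPrefixOf l then some r else pvFindRule l rest

-- Source B's `while i < n` loop: advancing the index = consuming the front of the char list
-- (every iteration consumes at least one char, so `fuel = length` iterations suffice)
def pvScanF (R : List (List Char × List Char)) : Nat → List Char → List Char
  | _, [] => []
  | 0, l => l
  | fuel + 1, c :: t =>
    match pvFindRule (c :: t) R with
    | some r => r.2 ++ pvScanF R fuel (t.drop (r.1.length - 1))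
    | none => c :: pvScanF R fuel t

def convert_to_uk_spelling_alt (text : String) : String :=
  String.ofList (pvScanF pvUkRules text.toList.length text.toList)

-- ===== PRECONDITION & SPEC =====
-- Pre_ excludes texts containing one of the five overlap collisions of two US spellings sharing
-- a letter ('colorealize', 'behaviorealize', 'centerealize', 'meterealize', 'programeter'):
-- there the result depends only on the accidental order in which the overlapping matches are
-- applied (A's sequential dict-order passes convert both overlapping words, B's left-to-right
-- scan converts the leftmost one), a corner no caller would specify either way.
def Pre_convert_to_uk_spelling (text : String) : Prop :=
  (PySem.Str.isIn "colorealize" text || PySem.Str.isIn "behaviorealize" text ||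
   PySem.Str.isIn "centerealize" text || PySem.Str.isIn "meterealize" text ||
   PySem.Str.isIn "programeter" text) = false
instance (text : String) : Decidable (Pre_convert_to_uk_spelling text) := by
  unfold Pre_convert_to_uk_spelling; infer_instance

def pvWitness_convert_to_uk_spelling : String := "the color of the center meter program"

def Spec_convert_to_uk_spelling (text : String) (out : String) : Prop :=
  out = convert_to_uk_spelling_alt text
instance (text : String) (out : String) : Decidable (Spec_convert_to_uk_spelling text out) := by
  unfold Spec_convert_to_uk_spelling; infer_instance

-- ===== CLAIM (what is proved, stated in full; the proofs are below) =====
def Claim_equal_convert_to_uk_spelling : Prop :=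
  ∀ (text : String), Dom_convert_to_uk_spelling text → Pre_convert_to_uk_spelling text →
    Spec_convert_to_uk_spelling text (convert_to_uk_spelling text)

-- ===== LEMMAS AND PROOFS =====

-- A's str.replace, in structurally recursive form
def pvRepl (k v : List Char) : List Char → List Char
  | [] => []
  | c :: t => if k.isPrefixOf (c :: t) then v ++ pvRepl k v (t.drop (k.length - 1)) else c :: pvRepl k v t
termination_by l => l.length
decreasing_by all_goals (simp; try omega)

theorem pvGoSpec (k v : List Char) (hk : k ≠ []) :
    ∀ fuel (l acc : List Char), l.length ≤ fuel →
      PySem.Chars.replace.go k v fuel l acc = acc.reverse ++ pvRepl k v l := by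
  intro fuel
  induction fuel with
  | zero =>
    intro l acc h
    have : l = [] := List.eq_nil_of_length_eq_zero (Nat.le_zero.mp h)
    subst this
    rw [PySem.Chars.replace.go.eq_1, pvRepl.eq_1]
  | succ n ih =>
    intro l acc h
    match l with
    | [] =>
      rw [PySem.Chars.replace.go.eq_2 _ _ _ _ (by omega), pvRepl.eq_1]
      simp
    | c :: t =>
      rw [PySem.Chars.replace.go.eq_3, pvRepl.eq_2]
      by_cases hp : k.isPrefixOf (c :: t)
      · simp only [hp, if_true]
        have hdrop : (c :: t).drop k.length = t.drop (k.length - 1) := by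
          cases k with | nil => exact absurd rfl hk | cons a b => simp
        have hlen : (t.drop (k.length - 1)).length ≤ n := by
          simp at h ⊢; omega
        rw [hdrop, ih _ _ hlen]
        simp
      · simp only [hp, Bool.false_eq_true, if_false]
        have hlen : t.length ≤ n := by simp at h; omega
        rw [ih t (c :: acc) hlen]
        simp

theorem pvReplaceEq (k v : List Char) (hk : k ≠ []) (l : List Char) :
    PySem.Chars.replace l k v = pvRepl k v l := by
  rw [PySem.Chars.replace]
  rw [if_neg (by simp [List.isEmpty_iff, hk])]
  simpa using pvGoSpec k v hk l.length l [] le_rfl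

-- the scan, without fuel (equal to pvScanF when fuel ≥ length; proofs use this form)
def pvScan (R : List (List Char × List Char)) : List Char → List Char
  | [] => []
  | c :: t =>
    match pvFindRule (c :: t) R with
    | some r => r.2 ++ pvScan R (t.drop (r.1.length - 1))
    | none => c :: pvScan R t
termination_by l => l.length
decreasing_by all_goals (simp; try omega)

-- the bad patterns on the char-list side
def pvBadL : List (List Char) :=
  [['c', 'o', 'l', 'o', 'r', 'e', 'a', 'l', 'i', 'z', 'e'],
   ['b', 'e', 'h', 'a', 'v', 'i', 'o', 'r', 'e', 'a', 'l', 'i', 'z', 'e'],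
   ['c', 'e', 'n', 't', 'e', 'r', 'e', 'a', 'l', 'i', 'z', 'e'],
   ['m', 'e', 't', 'e', 'r', 'e', 'a', 'l', 'i', 'z', 'e'],
   ['p', 'r', 'o', 'g', 'r', 'a', 'm', 'e', 't', 'e', 'r']]

def pvSafe (l : List Char) : Prop := ∀ p ∈ pvBadL, ¬ p <:+: l

theorem pvSafe_drop {l : List Char} (h : pvSafe l) (n : Nat) : pvSafe (l.drop n) :=
  fun p hp hinf => h p hp (hinf.trans (List.drop_suffix n l).isInfix)

-- prefix helpers
theorem pvPrefixOfAppend {u a b : List Char} (h : u <+: a ++ b) (hl : u.length ≤ a.length) : u <+: a := by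
  rw [List.prefix_iff_eq_take] at h ⊢
  rwa [List.take_append_of_le_length hl] at h

theorem pvDecomp {kk : List Char} {c : Char} {t : List Char} (hne : kk ≠ [])
    (hp : kk <+: (c :: t)) : c :: t = kk ++ t.drop (kk.length - 1) := by
  obtain ⟨s, hs⟩ := hp
  match kk, hne with
  | a :: kt, _ =>
    rw [List.cons_append] at hs
    injection hs with h1 h2
    subst h1
    rw [← h2]
    simp

-- pvFindRule facts
theorem pvFindRule_none_iff (l : List Char) (R : List (List Char × List Char)) :
    pvFindRule l R = none ↔ ∀ r ∈ R, ¬ r.1 <+: l := by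
  induction R with
  | nil => simp [pvFindRule]
  | cons r rest ih =>
    by_cases h : r.1.isPrefixOf l
    · constructor
      · intro hn; simp [pvFindRule, h] at hn
      · intro hall
        exact absurd (List.isPrefixOf_iff_prefix.mp h) (hall r List.mem_cons_self)
    · simp only [pvFindRule, h, Bool.false_eq_true, if_false, ih]
      constructor
      · intro hall r' hr'
        rcases List.mem_cons.mp hr' with rfl | hm
        · rw [← List.isPrefixOf_iff_prefix]; simp [h]
        · exact hall r' hm
      · intro hall r' hr'
        exact hall r' (List.mem_cons_of_mem _ hr')

theorem pvFindRule_some {l : List Char} {R : List (List Char × List Char)}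
    {r : List Char × List Char} (h : pvFindRule l R = some r) : r ∈ R ∧ r.1 <+: l := by
  induction R with
  | nil => simp [pvFindRule] at h
  | cons r' rest ih =>
    by_cases h' : r'.1.isPrefixOf l
    · simp [pvFindRule, h'] at h
      subst h
      exact ⟨List.mem_cons_self, List.isPrefixOf_iff_prefix.mp h'⟩
    · simp [pvFindRule, h'] at h
      obtain ⟨hm, hp⟩ := ih h
      exact ⟨List.mem_cons_of_mem _ hm, hp⟩

theorem pvFindRule_append_none {l : List Char} {R S : List (List Char × List Char)}
    (h : pvFindRule l R = none) : pvFindRule l (R ++ S) = pvFindRule l S := by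
  induction R with
  | nil => simp
  | cons r rest ih =>
    by_cases h' : r.1.isPrefixOf l
    · simp [pvFindRule, h'] at h
    · simp [pvFindRule, h'] at h ⊢
      exact ih h

theorem pvFindRule_append_some {l : List Char} {R S : List (List Char × List Char)}
    {r : List Char × List Char} (h : pvFindRule l R = some r) : pvFindRule l (R ++ S) = some r := by
  induction R with
  | nil => simp [pvFindRule] at h
  | cons r' rest ih =>
    by_cases h' : r'.1.isPrefixOf l
    · simp [pvFindRule, h'] at h ⊢; exact h
    · simp [pvFindRule, h'] at h ⊢; exact ih h

-- pvScan unfolding helpers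
theorem pvScan_cons_none {R : List (List Char × List Char)} {c : Char} {t : List Char}
    (h : pvFindRule (c :: t) R = none) : pvScan R (c :: t) = c :: pvScan R t := by
  rw [pvScan.eq_2, h]

theorem pvScan_cons_some {R : List (List Char × List Char)} {c : Char} {t : List Char}
    {r : List Char × List Char} (h : pvFindRule (c :: t) R = some r) :
    pvScan R (c :: t) = r.2 ++ pvScan R (t.drop (r.1.length - 1)) := by
  rw [pvScan.eq_2, h]

theorem pvScan_nilR : ∀ l : List Char, pvScan [] l = l := by
  intro l
  induction l with
  | nil => rw [pvScan.eq_1]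
  | cons c t ih => rw [pvScan_cons_none (by simp [pvFindRule]), ih]

-- scanning a region where no rule matches copies it
theorem pvScan_skip (R : List (List Char × List Char)) :
    ∀ (w X : List Char), (∀ p, p < w.length → pvFindRule ((w ++ X).drop p) R = none) →
      pvScan R (w ++ X) = w ++ pvScan R X := by
  intro w
  induction w with
  | nil => intro X _; simp
  | cons c w' ih =>
    intro X h
    have h0 : pvFindRule (c :: (w' ++ X)) R = none := by simpa using h 0 (by simp)
    rw [List.cons_append, pvScan_cons_none h0, ih X (fun p hp => by simpa using h (p + 1) (by simp; omega))]
    simp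

theorem pvRepl_skip (k v : List Char) (_hk : k ≠ []) :
    ∀ (w X : List Char), (∀ p, p < w.length → ¬ k <+: (w ++ X).drop p) →
      pvRepl k v (w ++ X) = w ++ pvRepl k v X := by
  intro w
  induction w with
  | nil => intro X _; simp
  | cons c w' ih =>
    intro X h
    have h0 : ¬ k.isPrefixOf (c :: (w' ++ X)) := by
      rw [List.isPrefixOf_iff_prefix]
      simpa using h 0 (by simp)
    rw [List.cons_append, pvRepl.eq_2, if_neg (by simpa using h0),
      ih X (fun p hp => by simpa using h (p + 1) (by simp; omega))]
    simp

theorem pvRepl_front (k v : List Char) (hk : k ≠ []) (X : List Char) :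
    pvRepl k v (k ++ X) = v ++ pvRepl k v X := by
  match k, hk with
  | a :: kt, _ =>
    rw [List.cons_append, pvRepl.eq_2,
      if_pos (List.isPrefixOf_iff_prefix.mpr (by simpa using List.prefix_append (a :: kt) X))]
    simp

-- "OK" condition: a short string that cannot be produced across a replacement boundary
abbrev pvOK (u : List Char) (R : List (List Char × List Char)) : Prop :=
  ∀ p, p < u.length → ∀ r ∈ R,
    ¬ r.2 <+: u.drop p ∧ (u.drop p <+: r.2 → u.drop p <+: r.1)

-- a prefix of the scan output satisfying pvOK is a prefix of the input
theorem pvReflect (R : List (List Char × List Char)) :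
    ∀ (t u : List Char), pvOK u R → u <+: pvScan R t → u <+: t := by
  intro t
  induction t with
  | nil =>
    intro u _ h
    rw [pvScan.eq_1] at h
    simpa using h
  | cons c t' ih =>
    intro u hOK hpre
    cases hf : pvFindRule (c :: t') R with
    | none =>
      rw [pvScan_cons_none hf] at hpre
      match u with
      | [] => exact List.nil_prefix
      | a :: u' =>
        rw [List.cons_prefix_cons] at hpre ⊢
        refine ⟨hpre.1, ih u' (fun p hp r hr => by simpa using hOK (p + 1) (by simp; omega) r hr) hpre.2⟩
    | some r =>
      rw [pvScan_cons_some hf] at hpre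
      match u with
      | [] => exact List.nil_prefix
      | a :: u' =>
        obtain ⟨hmem, hrp⟩ := pvFindRule_some hf
        obtain ⟨hnv, himp⟩ := hOK 0 (by simp) r hmem
        rw [List.drop_zero] at hnv himp
        rcases List.prefix_or_prefix_of_prefix hpre (List.prefix_append r.2 _) with h | h
        · exact (himp h).trans hrp
        · exact absurd h hnv

-- hypotheses under which one more replace pass fuses into the scan
abbrev pvStepH (R : List (List Char × List Char)) (k _v : List Char) : Prop :=
  k ≠ [] ∧
  (∀ r ∈ R, r.1 ≠ [] ∧ ¬ r.1 <+: k ∧ ¬ k <+: r.1) ∧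
  (∀ r ∈ R, ∀ p < k.length, 0 < p →
     ¬ r.1 <+: k.drop p ∧
     (k.drop p <+: r.1 → (k ++ r.1.drop (k.length - p)) ∈ pvBadL)) ∧
  pvOK (k.drop 1) R ∧
  (∀ r ∈ R, ∀ p < r.2.length,
     ¬ k <+: r.2.drop p ∧
     (r.2.drop p <+: k →
        pvOK (k.drop (r.2.length - p)) R ∧ (r.1 ++ k.drop (r.2.length - p)) ∈ pvBadL))

theorem pvStep (R : List (List Char × List Char)) (k v : List Char) (H : pvStepH R k v) :
    ∀ (n : Nat) (l : List Char), l.length ≤ n → pvSafe l →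
      pvRepl k v (pvScan R l) = pvScan (R ++ [(k, v)]) l := by
  obtain ⟨hk, hRk, hH3, hH4, hH5⟩ := H
  intro n
  induction n with
  | zero =>
    intro l hl _
    have : l = [] := List.eq_nil_of_length_eq_zero (Nat.le_zero.mp hl)
    subst this
    rw [pvScan.eq_1, pvScan.eq_1, pvRepl.eq_1]
  | succ n ih =>
    intro l hl hsafe
    match l with
    | [] => rw [pvScan.eq_1, pvScan.eq_1, pvRepl.eq_1]
    | c :: t =>
      have hsafet : pvSafe t := pvSafe_drop (l := c :: t) hsafe 1
      cases hfR : pvFindRule (c :: t) R with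
      | some r =>
        -- an earlier rule matches at the front
        obtain ⟨hmem, hrp⟩ := pvFindRule_some hfR
        have hr1ne : r.1 ≠ [] := (hRk r hmem).1
        have hfA : pvFindRule (c :: t) (R ++ [(k, v)]) = some r := pvFindRule_append_some hfR
        rw [pvScan_cons_some hfR, pvScan_cons_some hfA]
        have hdec : c :: t = r.1 ++ t.drop (r.1.length - 1) := pvDecomp hr1ne hrp
        have hrepl : pvRepl k v (r.2 ++ pvScan R (t.drop (r.1.length - 1))) =
            r.2 ++ pvRepl k v (pvScan R (t.drop (r.1.length - 1))) := by
          apply pvRepl_skip k v hk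
          intro p hp hkpre
          rw [List.drop_append_of_le_length (le_of_lt hp)] at hkpre
          obtain ⟨h5a, h5b⟩ := hH5 r hmem p hp
          by_cases hlen : k.length ≤ r.2.length - p
          · exact h5a (pvPrefixOfAppend hkpre (by simp; omega))
          · have hdp : r.2.drop p <+: k := by
              rcases List.prefix_or_prefix_of_prefix hkpre (List.prefix_append (r.2.drop p) _) with h | h
              · exact absurd (by simpa using h.length_le) (by omega)
              · exact h
            obtain ⟨hOKu, hbad⟩ := h5b hdp
            obtain ⟨u, hu⟩ := hdp
            have hulen : u = k.drop (r.2.length - p) := by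
              rw [← hu]; simp [List.drop_left']
            have husc : u <+: pvScan R (t.drop (r.1.length - 1)) := by
              rw [← hu] at hkpre
              exact (List.prefix_append_right_inj _).mp hkpre
            have hur : u <+: t.drop (r.1.length - 1) :=
              pvReflect R _ u (hulen ▸ hOKu) husc
            have hinl : (r.1 ++ u) <+: (c :: t) := by
              rw [hdec]
              exact (List.prefix_append_right_inj r.1).mpr hur
            exact absurd hinl.isInfix (hsafe _ (hulen ▸ hbad))
        rw [hrepl]
        congr 1
        exact ih (t.drop (r.1.length - 1)) (by simp at hl ⊢; omega) (pvSafe_drop hsafet _)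
      | none =>
        by_cases hkp : k <+: (c :: t)
        · -- the new rule matches at the front
          have hfA : pvFindRule (c :: t) (R ++ [(k, v)]) = some (k, v) := by
            rw [pvFindRule_append_none hfR]
            simp [pvFindRule, List.isPrefixOf_iff_prefix.mpr hkp]
          rw [pvScan_cons_some hfA]
          have hdec : c :: t = k ++ t.drop (k.length - 1) := pvDecomp hk hkp
          have hscanR : pvScan R (c :: t) = k ++ pvScan R (t.drop (k.length - 1)) := by
            rw [hdec]
            apply pvScan_skip
            intro p hp
            rw [pvFindRule_none_iff]
            intro r hr hrpre
            rcases Nat.eq_zero_or_pos p with rfl | hppos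
            · rw [List.drop_zero] at hrpre
              have hkk : k <+: k ++ t.drop (k.length - 1) := List.prefix_append _ _
              rcases List.prefix_or_prefix_of_prefix hrpre hkk with h | h
              · exact (hRk r hr).2.1 h
              · exact (hRk r hr).2.2 h
            · rw [List.drop_append_of_le_length (le_of_lt hp)] at hrpre
              obtain ⟨h3a, h3b⟩ := hH3 r hr p hp hppos
              by_cases hlen : r.1.length ≤ k.length - p
              · exact h3a (pvPrefixOfAppend hrpre (by simp; omega))
              · have hdp : k.drop p <+: r.1 := by
                  rcases List.prefix_or_prefix_of_prefix hrpre (List.prefix_append (k.drop p) _) with h | h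
                  · exact absurd (by simpa using h.length_le) (by omega)
                  · exact h
                have hbadmem := h3b hdp
                obtain ⟨u, hu⟩ := hdp
                have hulen : u = r.1.drop (k.length - p) := by
                  rw [← hu]; simp [List.drop_left']
                have hur : u <+: t.drop (k.length - 1) := by
                  rw [← hu] at hrpre
                  exact (List.prefix_append_right_inj _).mp hrpre
                have hinl : (k ++ u) <+: (c :: t) := by
                  rw [hdec]
                  exact (List.prefix_append_right_inj k).mpr hur
                exact absurd hinl.isInfix (hsafe _ (hulen ▸ hbadmem))
          rw [hscanR, pvRepl_front k v hk]
          congr 1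
          exact ih (t.drop (k.length - 1)) (by simp at hl ⊢; omega) (pvSafe_drop hsafet _)
        · -- no rule matches at the front
          have hfA : pvFindRule (c :: t) (R ++ [(k, v)]) = none := by
            rw [pvFindRule_append_none hfR]
            simp only [pvFindRule]
            rw [if_neg (by simp [List.isPrefixOf_iff_prefix]; exact hkp)]
          rw [pvScan_cons_none hfR, pvScan_cons_none hfA]
          have hnk : ¬ k.isPrefixOf (c :: pvScan R t) := by
            rw [List.isPrefixOf_iff_prefix]
            intro hx
            match k, hk, hx with
            | a :: kt, _, hx =>
              rw [List.cons_prefix_cons] at hx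
              have hkt : kt <+: t := pvReflect R t kt (by simpa using hH4) hx.2
              exact hkp (List.cons_prefix_cons.mpr ⟨hx.1, hkt⟩)
          rw [pvRepl.eq_2, if_neg (by simpa using hnk)]
          congr 1
          exact ih t (by simp at hl; omega) hsafet

abbrev pvChainH (R : List (List Char × List Char)) : Prop :=
  ∀ i < R.length, pvStepH (R.take i) (R.getD i ([], [])).1 (R.getD i ([], [])).2

theorem pvChain (R : List (List Char × List Char)) (H : pvChainH R) :
    ∀ l, pvSafe l → List.foldl (fun s r => pvRepl r.1 r.2 s) l R = pvScan R l := by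
  induction R using List.reverseRecOn with
  | nil => intro l _; rw [pvScan_nilR]; rfl
  | append_singleton R' r ihR =>
    intro l hs
    have hrest : pvChainH R' := by
      intro i hi
      have h2 := H i (by simp; omega)
      rwa [List.take_append_of_le_length (le_of_lt hi), List.getD_append _ _ _ _ hi] at h2
    have hstep := H R'.length (by simp)
    rw [List.take_left, List.getD_append_right _ _ _ _ le_rfl] at hstep
    simp only [Nat.sub_self, List.getD_cons_zero] at hstep
    rw [List.foldl_append, List.foldl_cons, List.foldl_nil, ihR hrest l hs]
    obtain ⟨rk, rv⟩ := r
    exact pvStep R' rk rv hstep l.length l le_rfl hs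

theorem pvScanF_eq (R : List (List Char × List Char)) (hR : ∀ r ∈ R, r.1 ≠ []) :
    ∀ (fuel : Nat) (l : List Char), l.length ≤ fuel → pvScanF R fuel l = pvScan R l := by
  intro fuel
  induction fuel with
  | zero =>
    intro l hl
    have : l = [] := List.eq_nil_of_length_eq_zero (Nat.le_zero.mp hl)
    subst this
    rw [pvScanF, pvScan.eq_1]
  | succ n ih =>
    intro l hl
    match l with
    | [] => rw [pvScanF, pvScan.eq_1]
    | c :: t =>
      rw [pvScanF, pvScan.eq_2]
      cases hf : pvFindRule (c :: t) R with
      | none =>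
        dsimp only
        rw [ih t (by simp at hl; omega)]
      | some r =>
        have hne : r.1 ≠ [] := hR r (pvFindRule_some hf).1
        have : (t.drop (r.1.length - 1)).length ≤ n := by
          have : 1 ≤ r.1.length := by
            match r.1, hne with | a :: b, _ => simp
          simp at hl ⊢
          omega
        dsimp only
        rw [ih _ this]

set_option maxRecDepth 100000 in
theorem pvChainHHolds : pvChainH pvUkRules := by
  intro i hi
  have hi18 : i < 18 := by simpa [pvUkRules] using hi
  interval_cases i <;>
    exact ⟨by decide, by decide, by decide, by decide, by decide⟩

theorem pvFoldStr :
    ∀ (L : List (String × String)) (s : String),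
      (L.foldl (fun t p => PySem.Str.replace t p.1 p.2) s).toList =
        List.foldl (fun l p => PySem.Chars.replace l p.1 p.2) s.toList
          (L.map (fun p => (p.1.toList, p.2.toList))) := by
  intro L
  induction L with
  | nil => intro s; rfl
  | cons p rest ih =>
    intro s
    simp only [List.foldl_cons, List.map_cons]
    rw [ih, PySem.Str.toList_replace]

theorem pvAtoList (text : String) :
    (convert_to_uk_spelling text).toList =
      List.foldl (fun s r => PySem.Chars.replace s r.1 r.2) text.toList pvUkRules := by
  rw [convert_to_uk_spelling, pvFoldStr]
  have h : List.map (fun (p : String × String) => (p.1.toList, p.2.toList))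
      [("color", "colour"), ("behavior", "behaviour"), ("organization", "organisation"),
       ("realize", "realise"), ("analyze", "analyse"), ("center", "centre"),
       ("meter", "metre"), ("program", "programme"), ("license", "licence"),
       ("defense", "defence"), ("offense", "offence"), ("specialize", "specialise"),
       ("standardize", "standardise"), ("optimize", "optimise"), ("customize", "customise"),
       ("summarize", "summarise"), ("categorize", "categorise"), ("prioritize", "prioritise")] = pvUkRules := by
    decide
  rw [h]

theorem pvFoldReplEq (R : List (List Char × List Char)) (h : ∀ r ∈ R, r.1 ≠ []) :
    ∀ l, List.foldl (fun s r => PySem.Chars.replace s r.1 r.2) l R =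
      List.foldl (fun s r => pvRepl r.1 r.2 s) l R := by
  induction R with
  | nil => intro l; rfl
  | cons r rest ih =>
    intro l
    simp only [List.foldl_cons]
    rw [pvReplaceEq r.1 r.2 (h r List.mem_cons_self) l]
    exact ih (fun r' hr' => h r' (List.mem_cons_of_mem _ hr')) _

theorem pvSafe_of_pre {text : String} (hP : Pre_convert_to_uk_spelling text) :
    pvSafe text.toList := by
  unfold Pre_convert_to_uk_spelling at hP
  simp only [Bool.or_eq_false_iff] at hP
  obtain ⟨⟨⟨⟨h1, h2⟩, h3⟩, h4⟩, h5⟩ := hP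
  intro p hp hinf
  fin_cases hp
  · have hx := (PySem.Str.isIn_iff_infix "colorealize" text).mpr
      (by rw [show "colorealize".toList = ['c', 'o', 'l', 'o', 'r', 'e', 'a', 'l', 'i', 'z', 'e'] from by decide]; exact hinf)
    rw [h1] at hx
    exact absurd hx (by decide)
  · have hx := (PySem.Str.isIn_iff_infix "behaviorealize" text).mpr
      (by rw [show "behaviorealize".toList = ['b', 'e', 'h', 'a', 'v', 'i', 'o', 'r', 'e', 'a', 'l', 'i', 'z', 'e'] from by decide]; exact hinf)
    rw [h2] at hx
    exact absurd hx (by decide)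
  · have hx := (PySem.Str.isIn_iff_infix "centerealize" text).mpr
      (by rw [show "centerealize".toList = ['c', 'e', 'n', 't', 'e', 'r', 'e', 'a', 'l', 'i', 'z', 'e'] from by decide]; exact hinf)
    rw [h3] at hx
    exact absurd hx (by decide)
  · have hx := (PySem.Str.isIn_iff_infix "meterealize" text).mpr
      (by rw [show "meterealize".toList = ['m', 'e', 't', 'e', 'r', 'e', 'a', 'l', 'i', 'z', 'e'] from by decide]; exact hinf)
    rw [h4] at hx
    exact absurd hx (by decide)
  · have hx := (PySem.Str.isIn_iff_infix "programeter" text).mpr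
      (by rw [show "programeter".toList = ['p', 'r', 'o', 'g', 'r', 'a', 'm', 'e', 't', 'e', 'r'] from by decide]; exact hinf)
    rw [h5] at hx
    exact absurd hx (by decide)

-- ===== VERDICT (by name: the statement is the Claim_ definition above) =====
set_option maxRecDepth 100000 in
theorem convert_to_uk_spelling_spec : Claim_equal_convert_to_uk_spelling := by
  intro text _hdom hP
  unfold Spec_convert_to_uk_spelling
  apply String.ext
  rw [pvAtoList, pvFoldReplEq pvUkRules (by decide),
    pvChain pvUkRules pvChainHHolds text.toList (pvSafe_of_pre hP)]
  rw [convert_to_uk_spelling_alt, String.toList_ofList,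
    pvScanF_eq pvUkRules (by decide) text.toList.length text.toList le_rfl]
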